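-- pv_equiv track=rewrite | github.com/kapikantzari/segmentation-evaluation | drafts/eyeball-segmentation-evaluation_draft3.py | valid_input_perform_eval
-- ===== SOURCE A (Python) =====
-- def valid_input_perform_eval(metrics_input):
--     """
--     Check the validity of the input for computing performance metrics.
--     """
--
--     if (len(metrics_input) == 0):
--         return None
--     else:
--         metrics = {"acc": 0, "dice":1, "hausdorff":2, "iou":3, "mcc":4}
--         metrics_indicator = [0, 0, 0, 0, 0]
--         for metric in metrics_input:
--             if (metric in metrics):
--                 metrics_indicator[metrics[metric]] = 1
--             else:
--                 return None
--         return metrics_indicator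
-- ===== SOURCE B (Python) =====
-- def valid_input_perform_eval(metrics_input):
--     """
--     Check the validity of the input for computing performance metrics.
--     """
--     if len(metrics_input) == 0:
--         return None
--     names = ("acc", "dice", "hausdorff", "iou", "mcc")
--     if not all(m in names for m in metrics_input):
--         return None
--     present = set(metrics_input)
--     return [1 if name in present else 0 for name in names]
-- ===== Notes on version B (the rewrite author's own statement) =====
-- stated objective: simpler
-- what changed: Separates validation from construction: a dedicated all() validation pass, then the indicator is built by scanning the fixed canonical name order and probing a set of the inputs, instead of A's single loop that mutates an indicator list via a dict of positions.
import Mathlib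
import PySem

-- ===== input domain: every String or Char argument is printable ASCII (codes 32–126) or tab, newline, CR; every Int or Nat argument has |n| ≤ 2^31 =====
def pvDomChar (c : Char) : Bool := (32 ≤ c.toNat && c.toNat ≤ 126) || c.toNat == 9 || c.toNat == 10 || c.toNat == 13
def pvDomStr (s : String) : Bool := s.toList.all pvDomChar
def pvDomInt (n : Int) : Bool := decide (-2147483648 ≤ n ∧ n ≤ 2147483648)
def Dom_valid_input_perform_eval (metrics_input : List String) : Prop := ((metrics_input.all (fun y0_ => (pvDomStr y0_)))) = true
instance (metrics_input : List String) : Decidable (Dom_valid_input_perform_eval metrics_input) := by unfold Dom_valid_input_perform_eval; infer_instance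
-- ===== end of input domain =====

-- B separates validation from construction: one all() validation pass over the input,
-- then the indicator is built by scanning the fixed canonical name order and probing a set
-- of the inputs (A instead runs one loop mutating an indicator list via a dict of positions).

-- ===== PORT A =====
def pvMetricsA : PySem.Dict String Int :=
  PySem.Dict.ofList [("acc", 0), ("dice", 1), ("hausdorff", 2), ("iou", 3), ("mcc", 4)]

-- the 'for metric in metrics_input' loop, with early 'return None'
def pvLoopA : List String → List Int → Option (List Int)
  | [], ind => some ind
  | m :: rest, ind =>
    if pvMetricsA.contains m then
      pvLoopA rest (PySem.List.pySetD ind (pvMetricsA.getD m 0) 1)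
    else none

def valid_input_perform_eval (metrics_input : List String) : Option (List Int) :=
  if metrics_input.length = 0 then none
  else pvLoopA metrics_input [0, 0, 0, 0, 0]

-- ===== PORT B =====
def pvNamesB : List String := ["acc", "dice", "hausdorff", "iou", "mcc"]

def valid_input_perform_eval_alt (metrics_input : List String) : Option (List Int) :=
  if metrics_input.length = 0 then none
  else if metrics_input.all (fun m => pvNamesB.contains m) then
    let present : PySem.Set String := PySem.Set.ofList metrics_input
    some (pvNamesB.map (fun n => if PySem.Set.contains present n then (1 : Int) else 0))
  else none

-- ===== PRECONDITION & SPEC =====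
def Spec_valid_input_perform_eval (metrics_input : List String) (out : Option (List Int)) : Prop := out = valid_input_perform_eval_alt metrics_input
instance (metrics_input : List String) (out : Option (List Int)) : Decidable (Spec_valid_input_perform_eval metrics_input out) := by unfold Spec_valid_input_perform_eval; infer_instance

-- ===== CLAIM (what is proved, stated in full; the proofs are below) =====
def Claim_equal_valid_input_perform_eval : Prop := ∀ (metrics_input : List String), Dom_valid_input_perform_eval metrics_input → Spec_valid_input_perform_eval metrics_input (valid_input_perform_eval metrics_input)

-- ===== LEMMAS AND PROOFS =====

lemma pvMetricsA_mk :
    pvMetricsA =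
      PySem.Dict.mk [("acc", 0), ("dice", 1), ("hausdorff", 2), ("iou", 3), ("mcc", 4)] := by
  decide

lemma pvLoopA_eq (xs : List String) (a b c d e : Int) :
    pvLoopA xs [a, b, c, d, e] =
      if xs.all (fun m => pvNamesB.contains m) then
        some [if xs.contains "acc" then 1 else a,
              if xs.contains "dice" then 1 else b,
              if xs.contains "hausdorff" then 1 else c,
              if xs.contains "iou" then 1 else d,
              if xs.contains "mcc" then 1 else e]
      else none := by
  induction xs generalizing a b c d e with
  | nil => simp [pvLoopA]
  | cons m rest ih =>
    by_cases h1 : "acc" = m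
    · subst h1
      simp [pvLoopA, pvMetricsA_mk, pvNamesB, ih, PySem.List.pySetD, PySem.List.pySet?, PySem.List.pyIdx?,
                PySem.Dict.contains_mk, PySem.Dict.get?_mk_cons, PySem.Dict.getD_eq_get?_getD]
    · by_cases h2 : "dice" = m
      · subst h2
        simp [pvLoopA, pvMetricsA_mk, pvNamesB, ih, PySem.List.pySetD, PySem.List.pySet?, PySem.List.pyIdx?,
                PySem.Dict.contains_mk, PySem.Dict.get?_mk_cons, PySem.Dict.getD_eq_get?_getD]
      · by_cases h3 : "hausdorff" = m
        · subst h3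
          simp [pvLoopA, pvMetricsA_mk, pvNamesB, ih, PySem.List.pySetD, PySem.List.pySet?, PySem.List.pyIdx?,
                PySem.Dict.contains_mk, PySem.Dict.get?_mk_cons, PySem.Dict.getD_eq_get?_getD]
        · by_cases h4 : "iou" = m
          · subst h4
            simp [pvLoopA, pvMetricsA_mk, pvNamesB, ih, PySem.List.pySetD, PySem.List.pySet?, PySem.List.pyIdx?,
                PySem.Dict.contains_mk, PySem.Dict.get?_mk_cons, PySem.Dict.getD_eq_get?_getD]
          · by_cases h5 : "mcc" = m
            · subst h5
              simp [pvLoopA, pvMetricsA_mk, pvNamesB, ih, PySem.List.pySetD, PySem.List.pySet?, PySem.List.pyIdx?,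
                PySem.Dict.contains_mk, PySem.Dict.get?_mk_cons, PySem.Dict.getD_eq_get?_getD]
            · simp [pvLoopA, pvMetricsA_mk, pvNamesB, h1, h2, h3, h4, h5,
                    Ne.symm h1, Ne.symm h2, Ne.symm h3, Ne.symm h4, Ne.symm h5,
                    PySem.Dict.contains_mk]

-- ===== VERDICT (by name: the statement is the Claim_ definition above) =====
theorem valid_input_perform_eval_spec : Claim_equal_valid_input_perform_eval := by
  intro xs _
  unfold Spec_valid_input_perform_eval valid_input_perform_eval valid_input_perform_eval_alt
  by_cases hnil : xs.length = 0
  · simp [hnil]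
  · simp only [hnil, if_false]
    rw [pvLoopA_eq]
    by_cases hall : xs.all (fun m => pvNamesB.contains m)
    · simp only [hall, if_true]
      simp [pvNamesB, PySem.Set.contains_eq_listContains, PySem.Set.mem_ofList]
    · simp only [hall, Bool.false_eq_true, if_false]
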